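-- pv_equiv track=rewrite | github.com/dnwls16071/Programmers_CodingTest | 프로그래머스/lv1/42840. 모의고사/모의고사.py | solution
-- ===== SOURCE A (Python) =====
-- def solution(answers):
--     ans_1 = [1, 2, 3, 4, 5]                 # 1번 수포자
--     ans_2 = [2, 1, 2, 3, 2, 4, 2, 5]        # 2번 수포자
--     ans_3 = [3, 3, 1, 1, 2, 2, 4, 4, 5, 5]  # 3번 수포자
--     answer = [0, 0, 0]                      # 맞힌 문항을 나타내는 배열
--
--     result = []
--     for idx, value in enumerate(answers):
--         if ans_1[idx % 5] == value:
--             answer[0] += 1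
--         if ans_2[idx % 8] == value:
--             answer[1] += 1
--         if ans_3[idx % 10] == value:
--             answer[2] += 1
--
--     Max = max(answer)
--     for i in range(len(answer)):
--         if answer[i] == Max:
--             result.append(i+1)
--     return result
-- ===== SOURCE B (Python) =====
-- def solution(answers):
--     # Bucket answers by (index mod 40, value) in one pass (40 = lcm of the three
--     # pattern periods); each taker's score is then a 40-term lookup sum over the
--     # histogram, never re-scanning answers.
--     cnt = {}
--     for i, a in enumerate(answers):
--         key = (i % 40, a)
--         cnt[key] = cnt.get(key, 0) + 1
--     patterns = [[1, 2, 3, 4, 5],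
--                 [2, 1, 2, 3, 2, 4, 2, 5],
--                 [3, 3, 1, 1, 2, 2, 4, 4, 5, 5]]
--     scores = [sum(cnt.get((r, p[r % len(p)]), 0) for r in range(40))
--               for p in patterns]
--     best = max(scores)
--     return [i + 1 for i, s in enumerate(scores) if s == best]
-- ===== Notes on version B (the rewrite author's own statement) =====
-- stated objective: alternative
-- what changed: Instead of comparing each answer against the three patterns, B builds a histogram keyed by (index mod 40, value) in one pass (40 = lcm of the pattern periods) and then computes each taker's score as a 40-term lookup sum over that histogram, so scoring never re-scans the answers.
import Mathlib
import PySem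

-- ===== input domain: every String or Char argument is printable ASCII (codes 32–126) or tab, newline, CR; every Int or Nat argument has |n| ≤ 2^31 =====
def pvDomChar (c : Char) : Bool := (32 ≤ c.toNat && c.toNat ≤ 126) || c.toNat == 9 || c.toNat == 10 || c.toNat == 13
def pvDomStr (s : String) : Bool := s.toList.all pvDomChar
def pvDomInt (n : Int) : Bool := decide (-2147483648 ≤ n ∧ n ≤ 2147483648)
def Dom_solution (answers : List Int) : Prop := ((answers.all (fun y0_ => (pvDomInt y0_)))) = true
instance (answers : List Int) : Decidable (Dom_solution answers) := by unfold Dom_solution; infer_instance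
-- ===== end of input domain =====

-- B replaces A's pattern-comparison loop by a histogram keyed by (index mod 40, value) built in one
-- pass, from which each taker's score is a 40-term lookup sum; objective: alternative.


-- ===== PORT A =====
def solution (answers : List Int) : List Int :=
  let ans1 : List Int := [1, 2, 3, 4, 5]
  let ans2 : List Int := [2, 1, 2, 3, 2, 4, 2, 5]
  let ans3 : List Int := [3, 3, 1, 1, 2, 2, 4, 4, 5, 5]
  let answer : Int × Int × Int :=
    (PySem.List.enumerate answers 0).foldl
      (fun (acc : Int × Int × Int) (iv : Int × Int) =>
        let a1 := if PySem.List.pyGetD ans1 (PySem.Int.mod iv.1 5) 0 = iv.2 then acc.1 + 1 else acc.1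
        let a2 := if PySem.List.pyGetD ans2 (PySem.Int.mod iv.1 8) 0 = iv.2 then acc.2.1 + 1 else acc.2.1
        let a3 := if PySem.List.pyGetD ans3 (PySem.Int.mod iv.1 10) 0 = iv.2 then acc.2.2 + 1 else acc.2.2
        (a1, a2, a3)) (0, 0, 0)
  let answerList : List Int := [answer.1, answer.2.1, answer.2.2]
  let Max : Int := (PySem.List.max? answerList (fun x => x)).getD 0
  (PySem.List.pyRange 0 answerList.length 1).foldl
    (fun res i => if PySem.List.pyGetD answerList i 0 = Max then res ++ [i + 1] else res) []

-- ===== PORT B =====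
def solution_alt (answers : List Int) : List Int :=
  let cnt : PySem.Dict (Int × Int) Int :=
    (PySem.List.enumerate answers 0).foldl
      (fun d iv =>
        d.insert (PySem.Int.mod iv.1 40, iv.2) (d.getD (PySem.Int.mod iv.1 40, iv.2) 0 + 1))
      PySem.Dict.empty
  let patterns : List (List Int) :=
    [[1, 2, 3, 4, 5], [2, 1, 2, 3, 2, 4, 2, 5], [3, 3, 1, 1, 2, 2, 4, 4, 5, 5]]
  let scores : List Int := patterns.map (fun p =>
    (PySem.List.pyRange 0 40 1).foldl
      (fun s r => s + cnt.getD (r, PySem.List.pyGetD p (PySem.Int.mod r (p.length : Int)) 0) 0) 0)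
  let best : Int := (PySem.List.max? scores (fun x => x)).getD 0
  (PySem.List.enumerate scores 0).foldl
    (fun res is => if is.2 = best then res ++ [is.1 + 1] else res) []

-- ===== PRECONDITION & SPEC =====
def Spec_solution (answers : List Int) (out : List Int) : Prop := out = solution_alt answers
instance (answers : List Int) (out : List Int) : Decidable (Spec_solution answers out) := by unfold Spec_solution; infer_instance

-- ===== CLAIM =====
def Claim_equal_solution : Prop := ∀ (answers : List Int), Dom_solution answers → Spec_solution answers (solution answers)

-- ===== LEMMAS AND PROOFS =====

/-- Matches of `as` against `pat` cycled starting at position `r` (wraps at `pat.length`). -/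
def mcount (pat : List Int) : List Int → Nat → Int
  | [], _ => 0
  | a :: as, r =>
      (if pat.getD r 0 = a then 1 else 0) +
        mcount pat as (if r + 1 = pat.length then 0 else r + 1)

theorem mcount_nil (pat : List Int) (r : Nat) : mcount pat [] r = 0 := rfl
theorem mcount_cons (pat : List Int) (a : Int) (as : List Int) (r : Nat) :
    mcount pat (a :: as) r =
      (if pat.getD r 0 = a then 1 else 0) +
        mcount pat as (if r + 1 = pat.length then 0 else r + 1) := rfl

/-- A's combined loop computes the three cyclic match counts. -/
theorem A_fold (as : List Int) : ∀ (i : Nat) (c1 c2 c3 : Int),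
    (PySem.List.enumerate as (i : Int)).foldl
      (fun (acc : Int × Int × Int) (iv : Int × Int) =>
        (if PySem.List.pyGetD [1, 2, 3, 4, 5] (PySem.Int.mod iv.1 5) 0 = iv.2 then acc.1 + 1 else acc.1,
         if PySem.List.pyGetD [2, 1, 2, 3, 2, 4, 2, 5] (PySem.Int.mod iv.1 8) 0 = iv.2 then acc.2.1 + 1 else acc.2.1,
         if PySem.List.pyGetD [3, 3, 1, 1, 2, 2, 4, 4, 5, 5] (PySem.Int.mod iv.1 10) 0 = iv.2 then acc.2.2 + 1 else acc.2.2)) (c1, c2, c3) =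
      (c1 + mcount [1, 2, 3, 4, 5] as (i % 5),
       c2 + mcount [2, 1, 2, 3, 2, 4, 2, 5] as (i % 8),
       c3 + mcount [3, 3, 1, 1, 2, 2, 4, 4, 5, 5] as (i % 10)) := by
  induction as with
  | nil => intro i c1 c2 c3; simp [PySem.List.enumerate_nil, mcount_nil]
  | cons a as ih =>
      intro i c1 c2 c3
      rw [PySem.List.enumerate_cons]
      have hcast : (i : Int) + 1 = ((i + 1 : Nat) : Int) := by push_cast; ring
      rw [List.foldl_cons, hcast]
      rw [show (if PySem.List.pyGetD [1, 2, 3, 4, 5] (PySem.Int.mod ((i : Nat) : Int) 5) 0 = a then c1 + 1 else c1,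
          if PySem.List.pyGetD [2, 1, 2, 3, 2, 4, 2, 5] (PySem.Int.mod ((i : Nat) : Int) 8) 0 = a then c2 + 1 else c2,
          if PySem.List.pyGetD [3, 3, 1, 1, 2, 2, 4, 4, 5, 5] (PySem.Int.mod ((i : Nat) : Int) 10) 0 = a then c3 + 1 else c3)
        = ((if PySem.List.pyGetD [1, 2, 3, 4, 5] (PySem.Int.mod ((i : Nat) : Int) 5) 0 = a then c1 + 1 else c1,
          if PySem.List.pyGetD [2, 1, 2, 3, 2, 4, 2, 5] (PySem.Int.mod ((i : Nat) : Int) 8) 0 = a then c2 + 1 else c2,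
          if PySem.List.pyGetD [3, 3, 1, 1, 2, 2, 4, 4, 5, 5] (PySem.Int.mod ((i : Nat) : Int) 10) 0 = a then c3 + 1 else c3) : Int × Int × Int) from rfl]
      rw [ih (i + 1)]
      have hm5 : PySem.Int.mod (i : Int) 5 = ((i % 5 : Nat) : Int) := by
        simp [PySem.Int.mod, Int.fmod_eq_emod]
      have hm8 : PySem.Int.mod (i : Int) 8 = ((i % 8 : Nat) : Int) := by
        simp [PySem.Int.mod, Int.fmod_eq_emod]
      have hm10 : PySem.Int.mod (i : Int) 10 = ((i % 10 : Nat) : Int) := by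
        simp [PySem.Int.mod, Int.fmod_eq_emod]
      have hl5 : ([1, 2, 3, 4, 5] : List Int).length = 5 := rfl
      have hl8 : ([2, 1, 2, 3, 2, 4, 2, 5] : List Int).length = 8 := rfl
      have hl10 : ([3, 3, 1, 1, 2, 2, 4, 4, 5, 5] : List Int).length = 10 := rfl
      have h5 : (if (i % 5) + 1 = 5 then 0 else (i % 5) + 1) = (i + 1) % 5 := by split_ifs <;> omega
      have h8 : (if (i % 8) + 1 = 8 then 0 else (i % 8) + 1) = (i + 1) % 8 := by split_ifs <;> omega
      have h10 : (if (i % 10) + 1 = 10 then 0 else (i % 10) + 1) = (i + 1) % 10 := by split_ifs <;> omega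
      simp only [mcount_cons, hl5, hl8, hl10, h5, h8, h10, hm5, hm8, hm10,
        PySem.List.pyGetD_natCast, Prod.mk.injEq]
      refine ⟨?_, ?_, ?_⟩ <;> split_ifs <;> ring

/-- `A_fold` at start index 0 and zero accumulator. -/
theorem A_fold0 (answers : List Int) :
    (PySem.List.enumerate answers 0).foldl
      (fun (acc : Int × Int × Int) (iv : Int × Int) =>
        (if PySem.List.pyGetD [1, 2, 3, 4, 5] (PySem.Int.mod iv.1 5) 0 = iv.2 then acc.1 + 1 else acc.1,
         if PySem.List.pyGetD [2, 1, 2, 3, 2, 4, 2, 5] (PySem.Int.mod iv.1 8) 0 = iv.2 then acc.2.1 + 1 else acc.2.1,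
         if PySem.List.pyGetD [3, 3, 1, 1, 2, 2, 4, 4, 5, 5] (PySem.Int.mod iv.1 10) 0 = iv.2 then acc.2.2 + 1 else acc.2.2)) (0, 0, 0) =
      (mcount [1, 2, 3, 4, 5] answers 0,
       mcount [2, 1, 2, 3, 2, 4, 2, 5] answers 0,
       mcount [3, 3, 1, 1, 2, 2, 4, 4, 5, 5] answers 0) := by
  simpa using A_fold answers 0 0 0 0

/-- Summing the indicator of key `(m, a)` over the 40 histogram slots hits exactly slot `m`. -/
theorem ind_sum (pat : List Int) (m : Nat) (hm : m < 40) (a : Int) :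
    (((PySem.List.pyRange 0 40 1).map (fun r =>
        if (((m : Int), a) == (r, PySem.List.pyGetD pat (PySem.Int.mod r (pat.length : Int)) 0))
        then (1 : Int) else 0)).sum)
      = if pat.getD (m % pat.length) 0 = a then 1 else 0 := by
  have h1 : PySem.List.pyRange 0 40 1
      = PySem.List.pyRange 0 (m : Int) 1 ++ PySem.List.pyRange (m : Int) 40 1 :=
    PySem.List.pyRange_one_append 0 (m : Int) 40 (by exact_mod_cast Nat.zero_le m)
      (by exact_mod_cast hm.le)
  have h2 : PySem.List.pyRange (m : Int) 40 1
      = (m : Int) :: PySem.List.pyRange ((m : Int) + 1) 40 1 :=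
    PySem.List.pyRange_one_cons (by exact_mod_cast hm)
  rw [h1, h2]
  rw [List.map_append, List.sum_append, List.map_cons, List.sum_cons]
  have hz1 : (((PySem.List.pyRange 0 (m : Int) 1).map (fun r =>
      if (((m : Int), a) == (r, PySem.List.pyGetD pat (PySem.Int.mod r (pat.length : Int)) 0))
      then (1 : Int) else 0)).sum) = 0 := by
    apply List.sum_eq_zero
    intro x hx
    obtain ⟨r, hr, rfl⟩ := List.mem_map.mp hx
    have := (PySem.List.mem_pyRange_one).mp hr
    have hne : ¬ (((m : Int), a) = (r, PySem.List.pyGetD pat (PySem.Int.mod r (pat.length : Int)) 0)) := by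
      rw [Prod.mk.injEq]
      rintro ⟨hh, -⟩; omega
    simp [hne]
  have hz2 : (((PySem.List.pyRange ((m : Int) + 1) 40 1).map (fun r =>
      if (((m : Int), a) == (r, PySem.List.pyGetD pat (PySem.Int.mod r (pat.length : Int)) 0))
      then (1 : Int) else 0)).sum) = 0 := by
    apply List.sum_eq_zero
    intro x hx
    obtain ⟨r, hr, rfl⟩ := List.mem_map.mp hx
    have := (PySem.List.mem_pyRange_one).mp hr
    have hne : ¬ (((m : Int), a) = (r, PySem.List.pyGetD pat (PySem.Int.mod r (pat.length : Int)) 0)) := by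
      rw [Prod.mk.injEq]
      rintro ⟨hh, -⟩; omega
    simp [hne]
  rw [hz1, hz2]
  have hmod : PySem.Int.mod ((m : Nat) : Int) (pat.length : Int) = ((m % pat.length : Nat) : Int) := by
    simp [PySem.Int.mod, Int.fmod_eq_emod]
  have hget : PySem.List.pyGetD pat (PySem.Int.mod ((m : Nat) : Int) (pat.length : Int)) 0
      = pat.getD (m % pat.length) 0 := by
    rw [hmod, PySem.List.pyGetD_natCast]
  simp only [hget, beq_iff_eq, Prod.mk.injEq, true_and]
  split_ifs with hc1 hc2 hc2 <;> simp_all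

/-- B's 40-slot histogram sum computes the cyclic match count, for any pattern whose
    period divides 40 and any starting index. -/
theorem B_sum (pat : List Int) (hL : 0 < pat.length) (hdvd : pat.length ∣ 40) :
    ∀ (as : List Int) (i : Nat),
    (((PySem.List.pyRange 0 40 1).map (fun r =>
        ((((PySem.List.enumerate as (i : Int)).map
            (fun iv => (PySem.Int.mod iv.1 40, iv.2))).count
          (r, PySem.List.pyGetD pat (PySem.Int.mod r (pat.length : Int)) 0) : Int)))).sum)
      = mcount pat as (i % pat.length) := by
  intro as
  induction as with
  | nil =>
      intro i
      rw [PySem.List.enumerate_nil]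
      simp [mcount_nil]
  | cons a as ih =>
      intro i
      rw [PySem.List.enumerate_cons, List.map_cons]
      have hcast : (i : Int) + 1 = ((i + 1 : Nat) : Int) := by push_cast; ring
      rw [hcast]
      have hcnt : ∀ (r : Int),
          (((( (PySem.Int.mod ((i : Nat) : Int) 40, a) ::
              (PySem.List.enumerate as ((i + 1 : Nat) : Int)).map
                (fun iv => (PySem.Int.mod iv.1 40, iv.2)))).count
            (r, PySem.List.pyGetD pat (PySem.Int.mod r (pat.length : Int)) 0) : Int))
          = (((PySem.List.enumerate as ((i + 1 : Nat) : Int)).map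
                (fun iv => (PySem.Int.mod iv.1 40, iv.2))).count
              (r, PySem.List.pyGetD pat (PySem.Int.mod r (pat.length : Int)) 0) : Int)
            + (if ((PySem.Int.mod ((i : Nat) : Int) 40, a)
                == (r, PySem.List.pyGetD pat (PySem.Int.mod r (pat.length : Int)) 0))
               then (1 : Int) else 0) := by
        intro r
        rw [List.count_cons]
        split_ifs <;> push_cast <;> ring
      have hmapeq : ((PySem.List.pyRange 0 40 1).map (fun r =>
          (((( (PySem.Int.mod ((i : Nat) : Int) 40, a) ::
              (PySem.List.enumerate as ((i + 1 : Nat) : Int)).map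
                (fun iv => (PySem.Int.mod iv.1 40, iv.2)))).count
            (r, PySem.List.pyGetD pat (PySem.Int.mod r (pat.length : Int)) 0) : Int))))
          = ((PySem.List.pyRange 0 40 1).map (fun r =>
              (((PySem.List.enumerate as ((i + 1 : Nat) : Int)).map
                  (fun iv => (PySem.Int.mod iv.1 40, iv.2))).count
                (r, PySem.List.pyGetD pat (PySem.Int.mod r (pat.length : Int)) 0) : Int)
              + (if ((PySem.Int.mod ((i : Nat) : Int) 40, a)
                  == (r, PySem.List.pyGetD pat (PySem.Int.mod r (pat.length : Int)) 0))
                 then (1 : Int) else 0))) :=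
        List.map_congr_left (fun r _ => hcnt r)
      rw [hmapeq, PySem.List.sum_map_add_int, ih (i + 1)]
      have hm40 : PySem.Int.mod ((i : Nat) : Int) 40 = ((i % 40 : Nat) : Int) := by
        simp [PySem.Int.mod, Int.fmod_eq_emod]
      rw [hm40, ind_sum pat (i % 40) (Nat.mod_lt i (by norm_num)) a]
      have hmm : (i % 40) % pat.length = i % pat.length := Nat.mod_mod_of_dvd i hdvd
      rw [hmm]
      have hnext : (if (i % pat.length) + 1 = pat.length then 0 else (i % pat.length) + 1)
          = (i + 1) % pat.length := by
        have hlt := Nat.mod_lt i hL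
        have key : (i + 1) % pat.length = (i % pat.length + 1) % pat.length :=
          (Nat.mod_add_mod i pat.length 1).symm
        split_ifs with h
        · rw [key, h, Nat.mod_self]
        · have hlt2 : i % pat.length + 1 < pat.length := by omega
          rw [key, Nat.mod_eq_of_lt hlt2]
      rw [mcount_cons, hnext]
      ring

/-- `B_sum` at start index 0. -/
theorem B_sum0 (pat : List Int) (hL : 0 < pat.length) (hdvd : pat.length ∣ 40) (answers : List Int) :
    (((PySem.List.pyRange 0 40 1).map (fun r =>
        ((((PySem.List.enumerate answers 0).map
            (fun iv => (PySem.Int.mod iv.1 40, iv.2))).count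
          (r, PySem.List.pyGetD pat (PySem.Int.mod r (pat.length : Int)) 0) : Int)))).sum)
      = mcount pat answers 0 := by
  simpa using B_sum pat hL hdvd answers 0

/-- With equal score triples, A's range-3 selection loop equals B's enumerate selection loop. -/
theorem tails_eq (c1 c2 c3 : Int) :
    (PySem.List.pyRange 0 ([c1, c2, c3] : List Int).length 1).foldl
      (fun res i => if PySem.List.pyGetD [c1, c2, c3] i 0 =
          (PySem.List.max? ([c1, c2, c3] : List Int) (fun x => x)).getD 0 then res ++ [i + 1] else res) [] =
    (PySem.List.enumerate ([c1, c2, c3] : List Int) 0).foldl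
      (fun res is => if is.2 = (PySem.List.max? ([c1, c2, c3] : List Int) (fun x => x)).getD 0
        then res ++ [is.1 + 1] else res) [] := by
  have hl : ((([c1, c2, c3] : List Int).length : Nat) : Int) = (3 : Int) := by
    simp
  have hr : PySem.List.pyRange 0 (3 : Int) 1 = [0, 1, 2] := by decide
  rw [hl, hr]
  rw [show PySem.List.enumerate ([c1, c2, c3] : List Int) 0
      = [(0, c1), (1, c2), (2, c3)] from by
    simp [PySem.List.enumerate_cons, PySem.List.enumerate_nil]]
  simp [PySem.List.pyGetD]

/-- B's counter-building fold is the counter of the key list. -/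
theorem cnt_eq (answers : List Int) :
    (PySem.List.enumerate answers 0).foldl
      (fun (d : PySem.Dict (Int × Int) Int) iv =>
        d.insert (PySem.Int.mod iv.1 40, iv.2) (d.getD (PySem.Int.mod iv.1 40, iv.2) 0 + 1))
      PySem.Dict.empty
    = PySem.Dict.counter ((PySem.List.enumerate answers 0).map
        (fun iv => (PySem.Int.mod iv.1 40, iv.2))) := by
  rw [← PySem.Dict.foldl_insert_getD_add_one_eq_counter, List.foldl_map]

-- ===== VERDICT (by name: the statement is the Claim_ definition above) =====
theorem solution_spec : Claim_equal_solution := by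
  intro answers _
  unfold Spec_solution solution solution_alt
  simp only [List.map]
  rw [A_fold0 answers, cnt_eq answers]
  simp only [PySem.Dict.getD_counter]
  rw [PySem.List.foldl_add, PySem.List.foldl_add, PySem.List.foldl_add]
  rw [B_sum0 [1, 2, 3, 4, 5] (by decide) (by decide) answers,
      B_sum0 [2, 1, 2, 3, 2, 4, 2, 5] (by decide) (by decide) answers,
      B_sum0 [3, 3, 1, 1, 2, 2, 4, 4, 5, 5] (by decide) (by decide) answers]
  simp only [zero_add]
  exact tails_eq _ _ _
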